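-- pv_equiv track=rewrite | github.com/maybeswapnil/botforge | src/botforge/services/uploader.py | _get_overlap_text
-- ===== SOURCE A (Python) =====
-- def _get_overlap_text(text: str, overlap_size: int) -> str:
--     """Get the last part of text for overlap, preferring sentence boundaries"""
--     if len(text) <= overlap_size:
--         return text
--
--     # Try to find a sentence boundary within the overlap region
--     overlap_start = len(text) - overlap_size
--     sentence_end = -1
--
--     for punct in ['.', '!', '?']:
--         pos = text.rfind(punct, overlap_start)
--         if pos > sentence_end and pos > overlap_start:
--             sentence_end = pos
--
--     if sentence_end > -1:
--         return text[sentence_end + 1:].strip()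
--     else:
--         # Fall back to word boundary
--         space_pos = text.rfind(' ', overlap_start)
--         if space_pos > overlap_start:
--             return text[space_pos + 1:].strip()
--         else:
--             return text[-overlap_size:]
-- ===== SOURCE B (Python) =====
-- def _get_overlap_text(text: str, overlap_size: int) -> str:
--     """Get the last part of text for overlap, preferring sentence boundaries"""
--     n = len(text)
--     if n <= overlap_size:
--         return text
--     start = n - overlap_size
--     # single forward pass tracking the last punctuation / space strictly past the boundary
--     last_punct = -1
--     last_space = -1
--     for i, ch in enumerate(text):
--         if i <= start:
--             continue
--         if ch in '.!?':
--             last_punct = i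
--         elif ch == ' ':
--             last_space = i
--     if last_punct != -1:
--         return text[last_punct + 1:].strip()
--     elif last_space != -1:
--         return text[last_space + 1:].strip()
--     return text[-overlap_size:]
-- ===== Notes on version B (the rewrite author's own statement) =====
-- stated objective: alternative
-- what changed: Replaces A's three separate backward str.rfind scans plus max/filter bookkeeping (and the extra space rfind) by a single forward pass over the text that tracks the last punctuation index and the last space index past the boundary in one accumulator.
import Mathlib
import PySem

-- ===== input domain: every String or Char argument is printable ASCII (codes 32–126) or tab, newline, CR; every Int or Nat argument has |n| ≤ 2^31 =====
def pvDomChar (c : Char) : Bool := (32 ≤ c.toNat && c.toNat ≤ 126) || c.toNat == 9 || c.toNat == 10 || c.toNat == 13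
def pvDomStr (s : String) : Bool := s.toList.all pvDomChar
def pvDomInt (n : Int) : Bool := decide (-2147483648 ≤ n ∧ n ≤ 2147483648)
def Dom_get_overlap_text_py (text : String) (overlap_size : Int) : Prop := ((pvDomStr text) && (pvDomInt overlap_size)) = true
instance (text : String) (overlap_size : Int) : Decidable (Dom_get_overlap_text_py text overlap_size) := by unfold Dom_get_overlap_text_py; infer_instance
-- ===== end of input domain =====

-- B replaces A's three backward rfind scans plus max bookkeeping by ONE forward pass
-- over the text that tracks the last punctuation and last space past the boundary
-- (objective: alternative decomposition, same asymptotic cost).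

-- ===== PORT A =====
-- hand port of str.rfind(c, start) for a single character c: backward scan from index i
-- down, first index ≥ start holding c, else -1; exact for the nonnegative starts A uses.
def pyRfindChar (cs : List Char) (c : Char) (start : Int) : Nat → Int
  | 0 => if (0 : Int) < start then -1 else if cs.getD 0 ' ' == c then 0 else -1
  | (i+1) => if ((i : Int) + 1) < start then -1
             else if cs.getD (i+1) ' ' == c then ((i : Int) + 1)
             else pyRfindChar cs c start i

def get_overlap_text_py (text : String) (overlap_size : Int) : String :=
  let cs := text.toList
  if (cs.length : Int) ≤ overlap_size then text
  else
    let overlap_start : Int := (cs.length : Int) - overlap_size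
    let sentence_end : Int :=
      (['.', '!', '?'] : List Char).foldl
        (fun acc punct =>
          let pos := pyRfindChar cs punct overlap_start (cs.length - 1)
          if pos > acc ∧ pos > overlap_start then pos else acc) (-1)
    if sentence_end > -1 then
      String.ofList (PySem.Chars.strip (PySem.List.slice cs (some (sentence_end + 1)) none))
    else
      let space_pos := pyRfindChar cs ' ' overlap_start (cs.length - 1)
      if space_pos > overlap_start then
        String.ofList (PySem.Chars.strip (PySem.List.slice cs (some (space_pos + 1)) none))
      else
        String.ofList (PySem.List.slice cs (some (-overlap_size)) none)

-- ===== PORT B =====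
-- the forward loop of Source B: walk the characters left to right with their index,
-- skipping indices ≤ L, remembering the last punctuation index and last space index
def fwdScan (L : Int) (i : Int) (p s : Int) : List Char → Int × Int
  | [] => (p, s)
  | c :: rest =>
      if i ≤ L then fwdScan L (i + 1) p s rest
      else if c == '.' || c == '!' || c == '?' then fwdScan L (i + 1) i s rest
      else if c == ' ' then fwdScan L (i + 1) p i rest
      else fwdScan L (i + 1) p s rest

def get_overlap_text_py_alt (text : String) (overlap_size : Int) : String :=
  let cs := text.toList
  if (cs.length : Int) ≤ overlap_size then text
  else
    let L : Int := (cs.length : Int) - overlap_size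
    let ps := fwdScan L 0 (-1) (-1) cs
    if ps.1 ≠ -1 then
      String.ofList (PySem.Chars.strip (PySem.List.slice cs (some (ps.1 + 1)) none))
    else if ps.2 ≠ -1 then
      String.ofList (PySem.Chars.strip (PySem.List.slice cs (some (ps.2 + 1)) none))
    else
      String.ofList (PySem.List.slice cs (some (-overlap_size)) none)

-- ===== PRECONDITION & SPEC =====
def Spec_get_overlap_text_py (text : String) (overlap_size : Int) (out : String) : Prop := out = get_overlap_text_py_alt text overlap_size
instance (text : String) (overlap_size : Int) (out : String) : Decidable (Spec_get_overlap_text_py text overlap_size out) := by unfold Spec_get_overlap_text_py; infer_instance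

-- ===== CLAIM =====
def Claim_equal_get_overlap_text_py : Prop := ∀ (text : String) (overlap_size : Int), Dom_get_overlap_text_py text overlap_size → Spec_get_overlap_text_py text overlap_size (get_overlap_text_py text overlap_size)

-- ===== LEMMAS AND PROOFS =====
-- proof-only helper: highest index j with stop < j ≤ i and p cs[j], else -1
def scanBack (cs : List Char) (p : Char → Bool) (stop : Int) : Nat → Int
  | 0 => if (0 : Int) ≤ stop then -1 else if p (cs.getD 0 ' ') then 0 else -1
  | (i+1) => if ((i : Int) + 1) ≤ stop then -1
             else if p (cs.getD (i+1) ' ') then ((i : Int) + 1)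
             else scanBack cs p stop i

-- proof-only helper: scanBack over the whole list
def sB (cs : List Char) (p : Char → Bool) (L : Int) : Int := scanBack cs p L (cs.length - 1)

theorem scanBack_le (cs : List Char) (p : Char → Bool) (L : Int) (i : Nat) :
    scanBack cs p L i ≤ (i : Int) := by
  induction i with
  | zero => simp only [scanBack]; split_ifs <;> omega
  | succ i ih => simp only [scanBack]; split_ifs <;> push_cast <;> omega

theorem scanBack_stop (cs : List Char) (p : Char → Bool) (L : Int) (i : Nat)
    (h : (i : Int) ≤ L) : scanBack cs p L i = -1 := by
  cases i with
  | zero => simp only [scanBack]; rw [if_pos (show (0:Int) ≤ L by exact_mod_cast h)]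
  | succ i => simp only [scanBack]; rw [if_pos (by push_cast at h ⊢; omega)]

theorem scanBack_congr (cs cs' : List Char) (p : Char → Bool) (L : Int) (i : Nat)
    (h : ∀ j ≤ i, cs.getD j ' ' = cs'.getD j ' ') :
    scanBack cs p L i = scanBack cs' p L i := by
  induction i with
  | zero => simp only [scanBack, h 0 (le_refl 0)]
  | succ i ih =>
    simp only [scanBack, h (i+1) (le_refl (i+1))]
    rw [ih (fun j hj => h j (Nat.le_succ_of_le hj))]

theorem scanBack_union (cs : List Char) (p q : Char → Bool) (L : Int) (i : Nat) :
    scanBack cs (fun c => p c || q c) L i = max (scanBack cs p L i) (scanBack cs q L i) := by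
  induction i with
  | zero =>
    simp only [scanBack, Bool.or_eq_true]
    split_ifs <;> simp_all
  | succ i ih =>
    have hp := scanBack_le cs p L i
    have hq := scanBack_le cs q L i
    simp only [scanBack, Bool.or_eq_true]
    split_ifs <;> simp_all <;> omega

theorem pyRfindChar_neg (cs : List Char) (c : Char) (L : Int) (i : Nat) (h : (i : Int) < L) :
    pyRfindChar cs c L i = -1 := by
  cases i with
  | zero => simp only [pyRfindChar]; split_ifs <;> simp_all
  | succ i => simp only [pyRfindChar]; split_ifs <;> push_cast at h ⊢ <;> omega

theorem scanBack_eq_rfind (cs : List Char) (c : Char) (L : Int) (hL : 0 ≤ L) (i : Nat) :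
    scanBack cs (fun x => x == c) L i =
      if pyRfindChar cs c L i > L then pyRfindChar cs c L i else -1 := by
  induction i with
  | zero =>
    simp only [scanBack, pyRfindChar]
    split_ifs <;> simp_all <;> omega
  | succ i ih =>
    by_cases hb : ((i : Int) + 1) ≤ L
    · by_cases hlt : ((i : Int) + 1) < L
      · simp only [scanBack, pyRfindChar, if_pos hb, if_pos hlt]; split_ifs <;> omega
      · have hEq : ((i : Int) + 1) = L := by omega
        simp only [scanBack, pyRfindChar, if_pos hb, if_neg hlt]
        by_cases hc : cs.getD (i+1) ' ' == c
        · rw [if_pos hc]; rw [if_neg (by omega)]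
        · rw [if_neg hc]
          rw [pyRfindChar_neg cs c L i (by omega)]
          rw [if_neg (by omega)]
    · have hlt : ¬ ((i : Int) + 1) < L := by omega
      simp only [scanBack, pyRfindChar, if_neg hb, if_neg hlt]
      by_cases hc : cs.getD (i+1) ' ' == c
      · rw [if_pos hc, if_pos hc, if_pos (by omega)]
      · rw [if_neg hc, if_neg hc, ih]

theorem fold3_eq_max (a b c L : Int) (hL : 0 ≤ L) :
    (if c > (if b > (if a > -1 ∧ a > L then a else -1) ∧ b > L then b
             else (if a > -1 ∧ a > L then a else -1)) ∧ c > L then c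
     else (if b > (if a > -1 ∧ a > L then a else -1) ∧ b > L then b
           else (if a > -1 ∧ a > L then a else -1)))
    = max (max (if a > L then a else -1) (if b > L then b else -1))
          (if c > L then c else -1) := by
  split_ifs <;> omega

theorem scanBack_eq_iff (cs : List Char) (c : Char) (L : Int) (hL : 0 ≤ L) (i : Nat) :
    (scanBack cs (fun x => x == c) L i ≥ 0 ↔ pyRfindChar cs c L i > L) ∧
    (pyRfindChar cs c L i > L → scanBack cs (fun x => x == c) L i = pyRfindChar cs c L i) := by
  rw [scanBack_eq_rfind cs c L hL i]
  constructor
  · constructor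
    · intro h; by_contra hn; rw [if_neg hn] at h; omega
    · intro h; rw [if_pos h]; omega
  · intro h; rw [if_pos h]

theorem sB_stop (cs : List Char) (p : Char → Bool) (L : Int)
    (h : (cs.length : Int) ≤ L) : sB cs p L = -1 := by
  unfold sB
  apply scanBack_stop
  have h1 : ((cs.length - 1 : Nat) : Int) ≤ (cs.length : Int) := by
    exact_mod_cast Nat.sub_le _ _
  omega

theorem sB_append (xs : List Char) (c : Char) (p : Char → Bool) (L : Int) (hL : 1 ≤ L) :
    sB (xs ++ [c]) p L =
      if (xs.length : Int) ≤ L then -1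
      else if p c then (xs.length : Int) else sB xs p L := by
  unfold sB
  cases xs with
  | nil =>
    simp only [List.nil_append, List.length_singleton, List.length_nil]
    simp only [scanBack]
    rw [if_pos (by omega : (0:Int) ≤ L), if_pos (by omega : ((0:Nat):Int) ≤ L)]
  | cons d ds =>
    have hlen : (d :: ds ++ [c]).length - 1 = ds.length + 1 := by simp
    rw [hlen]
    have hgetc : (d :: ds ++ [c]).getD (ds.length + 1) ' ' = c := by
      have : (d :: ds ++ [c])[ds.length + 1]? = some c := by
        rw [List.getElem?_eq_getElem (by simp)]
        simp [List.getElem_append_right]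
      simp only [List.getD]; rw [this]; rfl
    simp only [scanBack, hgetc]
    have hrest : scanBack (d :: ds ++ [c]) p L ds.length = scanBack (d :: ds) p L ds.length := by
      apply scanBack_congr
      intro j hj
      have : (d :: ds ++ [c])[j]? = (d :: ds)[j]? := by
        rw [List.getElem?_append_left (by simp; omega)]
      simp only [List.getD]; rw [this]
    rw [hrest]
    simp only [List.length_cons]
    push_cast
    rfl

theorem punct_ne_space (c : Char) (h : (c == '.' || c == '!' || c == '?') = true) :
    (c == ' ') = false := by
  simp only [Bool.or_eq_true, beq_iff_eq] at h
  rcases h with (h | h) | h <;> subst h <;> decide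

theorem fwdScan_append (L : Int) (xs : List Char) (c : Char) :
    ∀ (i p s : Int), fwdScan L i p s (xs ++ [c]) =
      (if i + (xs.length : Int) ≤ L then fwdScan L i p s xs
       else if c == '.' || c == '!' || c == '?' then (i + (xs.length : Int), (fwdScan L i p s xs).2)
       else if c == ' ' then ((fwdScan L i p s xs).1, i + (xs.length : Int))
       else fwdScan L i p s xs) := by
  induction xs with
  | nil =>
    intro i p s
    simp only [List.nil_append, List.length_nil, Nat.cast_zero, add_zero, fwdScan]
  | cons d ds ih =>
    intro i p s
    simp only [List.cons_append, fwdScan, List.length_cons, ih]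
    have harith : i + ((ds.length : Int) + 1) = (i + 1) + (ds.length : Int) := by ring
    push_cast
    rw [harith]
    split_ifs <;> rfl

theorem fwdScan_eq (L : Int) (hL : 1 ≤ L) (cs : List Char) :
    fwdScan L 0 (-1) (-1) cs =
      (sB cs (fun c => c == '.' || c == '!' || c == '?') L, sB cs (fun c => c == ' ') L) := by
  induction cs using List.reverseRecOn with
  | nil =>
    have h0 : (0:Int) ≤ L := by omega
    simp [fwdScan, sB, scanBack, h0]
  | append_singleton xs c ih =>
    rw [fwdScan_append, ih]
    rw [sB_append xs c _ L hL, sB_append xs c _ L hL]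
    simp only [zero_add]
    by_cases h1 : (xs.length : Int) ≤ L
    · rw [if_pos h1, if_pos h1, if_pos h1]
      rw [sB_stop xs _ L h1, sB_stop xs _ L h1]
    · rw [if_neg h1, if_neg h1, if_neg h1]
      by_cases h2 : (c == '.' || c == '!' || c == '?') = true
      · rw [if_pos h2, if_pos h2, punct_ne_space c h2]
        simp
      · rw [if_neg h2, if_neg h2]
        by_cases h3 : (c == ' ') = true
        · rw [if_pos h3, if_pos h3]
        · rw [if_neg h3, if_neg h3]

-- ===== VERDICT =====
theorem get_overlap_text_py_spec : Claim_equal_get_overlap_text_py := by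
  unfold Claim_equal_get_overlap_text_py
  intro text overlap_size _
  unfold Spec_get_overlap_text_py
  unfold get_overlap_text_py get_overlap_text_py_alt
  set cs := text.toList with hcs
  by_cases hlen : (cs.length : Int) ≤ overlap_size
  · simp [hlen]
  · simp only [if_neg hlen]
    set L : Int := (cs.length : Int) - overlap_size with hLdef
    have hL : 1 ≤ L := by omega
    have hL0 : 0 ≤ L := by omega
    set i := cs.length - 1 with hi
    rw [fwdScan_eq L hL cs]
    -- identify B's punctuation component with A's sentence_end
    have hunion : sB cs (fun c => c == '.' || c == '!' || c == '?') L
        = max (max (scanBack cs (fun x => x == '.') L i) (scanBack cs (fun x => x == '!') L i))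
              (scanBack cs (fun x => x == '?') L i) := by
      unfold sB
      rw [← hi]
      rw [show (fun c : Char => c == '.' || c == '!' || c == '?')
            = (fun c : Char => ((fun x => x == '.') c || (fun x => x == '!') c) || (fun x => x == '?') c) from rfl]
      rw [scanBack_union, scanBack_union]
    have hdot := scanBack_eq_rfind cs '.' L hL0 i
    have hbang := scanBack_eq_rfind cs '!' L hL0 i
    have hq := scanBack_eq_rfind cs '?' L hL0 i
    set a := pyRfindChar cs '.' L i with ha
    set b := pyRfindChar cs '!' L i with hb
    set c := pyRfindChar cs '?' L i with hc
    have hse : (['.', '!', '?'] : List Char).foldl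
        (fun acc punct =>
          let pos := pyRfindChar cs punct L i
          if pos > acc ∧ pos > L then pos else acc) (-1)
        = sB cs (fun c => c == '.' || c == '!' || c == '?') L := by
      simp only [List.foldl]
      rw [hunion, hdot, hbang, hq, ← ha, ← hb, ← hc]
      exact fold3_eq_max a b c L hL0
    rw [hse]
    have hjrange : sB cs (fun c => c == '.' || c == '!' || c == '?') L = -1 ∨
        sB cs (fun c => c == '.' || c == '!' || c == '?') L > L := by
      rw [hunion, hdot, hbang, hq]
      split_ifs <;> omega
    generalize hg : sB cs (fun c => c == '.' || c == '!' || c == '?') L = j at hjrange ⊢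
    by_cases hfound : j > -1
    · rw [if_pos hfound, if_pos (by omega : j ≠ -1)]
    · rw [if_neg hfound, if_neg (by omega : ¬ j ≠ -1)]
      have hsp := scanBack_eq_iff cs ' ' L hL0 i
      have hsBsp : sB cs (fun c => c == ' ') L = scanBack cs (fun x => x == ' ') L i := by
        unfold sB; rw [← hi]
      rw [hsBsp]
      set k := scanBack cs (fun x => x == ' ') L i with hk
      set sp := pyRfindChar cs ' ' L i with hspd
      have hkrange : k = -1 ∨ k ≥ 0 := by
        rw [hk, scanBack_eq_rfind cs ' ' L hL0 i]; split_ifs <;> omega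
      by_cases hspc : sp > L
      · rw [if_pos hspc, if_pos (by have := hsp.1.mpr hspc; omega : k ≠ -1), hsp.2 hspc]
      · rw [if_neg hspc, if_neg (by
          have : ¬ k ≥ 0 := by rw [hsp.1]; exact hspc
          omega)]
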